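-- pv_equiv track=rewrite | github.com/jusexton/python-challenges | challenges/codewars/cuttheropes.py | cut_the_ropes
-- ===== SOURCE A (Python) =====
-- from typing import List
--
-- def cut_the_ropes(values: List[int]):
--     values = sorted(values)
--     result = []
--
--     while len(values) > 0:
--         first = values[0]
--         result.append(len(values))
--         values = [value - first for value in values if value - first != 0]
--
--     return result
-- ===== SOURCE B (Python) =====
-- def cut_the_ropes(values):
--     # Sort once, then one pass: at each start of a new group of equal values,
--     # the number of ropes still standing is n - i.
--     s = sorted(values)
--     n = len(s)
--     result = []
--     prev = None
--     for i, v in enumerate(s):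
--         if v != prev:
--             result.append(n - i)
--             prev = v
--     return result
-- ===== Notes on version B (the rewrite author's own statement) =====
-- stated objective: faster
-- what changed: Instead of repeatedly rebuilding the whole list (subtract min, drop zeros) once per distinct value, B sorts once and does a single pass over the sorted list, emitting n - i at the first index of each group of equal values.
import Mathlib
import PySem

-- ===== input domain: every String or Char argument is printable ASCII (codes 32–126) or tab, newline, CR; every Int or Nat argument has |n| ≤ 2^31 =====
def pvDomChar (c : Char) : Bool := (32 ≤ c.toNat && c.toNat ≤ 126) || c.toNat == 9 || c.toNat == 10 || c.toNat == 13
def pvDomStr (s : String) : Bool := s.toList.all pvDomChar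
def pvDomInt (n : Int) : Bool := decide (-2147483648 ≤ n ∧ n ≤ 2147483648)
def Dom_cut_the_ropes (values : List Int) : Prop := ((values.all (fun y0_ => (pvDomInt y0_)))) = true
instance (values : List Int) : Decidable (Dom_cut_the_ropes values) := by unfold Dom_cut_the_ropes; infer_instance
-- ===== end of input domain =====

-- B sorts once and emits n - i at each start of a group of equal values in a single pass,
-- instead of A's repeated rebuild of the whole list per distinct value (faster, asymptotic).


-- ===== PORT A =====
-- while loop of A: head is the minimum (list is sorted), append length, rebuild list
def cutA : List Int → List Int
  | [] => []
  | a :: t =>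
    (((a :: t).length : Nat) : Int) ::
      cutA (((a :: t).filter (fun v => v - a ≠ 0)).map (fun v => v - a))
  termination_by l => l.length
  decreasing_by
    simp only [List.length_map, List.filter_cons]
    simp only [sub_self, ne_eq, not_true_eq_false, decide_false]
    exact Nat.lt_succ_of_le (List.length_filter_le _ _)

def cut_the_ropes (values : List Int) : List Int :=
  cutA (PySem.List.sorted values (fun x => x) false)

-- ===== PORT B =====
-- the for loop of B: prev, index i, accumulator result
def goB (n : Int) : Option Int → Int → List Int → List Int → List Int
  | _, _, [], acc => acc
  | prev, i, v :: t, acc =>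
    if some v ≠ prev then goB n (some v) (i + 1) t (acc ++ [n - i])
    else goB n prev (i + 1) t acc

def cut_the_ropes_alt (values : List Int) : List Int :=
  let s := PySem.List.sorted values (fun x => x) false
  let n : Int := (s.length : Nat)
  goB n none 0 s []

-- ===== PRECONDITION & SPEC =====
def Spec_cut_the_ropes (values : List Int) (out : List Int) : Prop := out = cut_the_ropes_alt values
instance (values : List Int) (out : List Int) : Decidable (Spec_cut_the_ropes values out) := by unfold Spec_cut_the_ropes; infer_instance

-- ===== CLAIM (what is proved, stated in full; the proofs are below) =====
def Claim_equal_cut_the_ropes : Prop := ∀ (values : List Int), Dom_cut_the_ropes values → Spec_cut_the_ropes values (cut_the_ropes values)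

-- ===== LEMMAS AND PROOFS =====

-- abstract "emit current length at each group start" function both sides reduce to
def hp : Option Int → List Int → List Int
  | _, [] => []
  | prev, v :: t =>
    if some v ≠ prev then (((v :: t).length : Nat) : Int) :: hp (some v) t else hp prev t

theorem hp_cons_ne (prev : Option Int) (v : Int) (t : List Int) (h : some v ≠ prev) :
    hp prev (v :: t) = (((v :: t).length : Nat) : Int) :: hp (some v) t := by
  simp only [hp]; rw [if_pos h]

theorem hp_cons_eq (v : Int) (t : List Int) : hp (some v) (v :: t) = hp (some v) t := by
  simp only [hp]; rw [if_neg (by simp)]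

theorem cutA_cons (a : Int) (t : List Int) :
    cutA (a :: t) = (((a :: t).length : Nat) : Int) ::
      cutA (((a :: t).filter (fun v => v - a ≠ 0)).map (fun v => v - a)) := by
  rw [cutA]

theorem goB_eq (n : Int) (s : List Int) : ∀ (prev : Option Int) (i : Int) (acc : List Int),
    n - i = (s.length : Int) → goB n prev i s acc = acc ++ hp prev s := by
  induction s with
  | nil => intro prev i acc h; simp [goB, hp]
  | cons v t ih =>
    intro prev i acc h
    simp only [List.length_cons] at h
    by_cases hv : some v ≠ prev
    · simp only [goB]
      rw [if_pos hv, hp_cons_ne prev v t hv,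
        ih (some v) (i + 1) (acc ++ [n - i]) (by push_cast at h ⊢; omega)]
      have hni : n - i = (((v :: t).length : Nat) : Int) := by push_cast at h ⊢; simp; omega
      simp [hni]
    · have hv' : some v = prev := not_not.mp hv
      simp only [goB]
      rw [if_neg hv, ← hv', hp_cons_eq]
      exact ih (some v) (i + 1) acc (by push_cast at h ⊢; omega)

theorem filter_map_shift (l : List Int) (a c : Int) :
    ((l.map (fun v => v - c)).filter (fun v => decide (v - (a - c) ≠ 0))).map (fun v => v - (a - c))
      = (l.filter (fun v => decide (v - a ≠ 0))).map (fun v => v - a) := by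
  induction l with
  | nil => rfl
  | cons b t ih =>
    simp only [List.map_cons, List.filter_cons]
    by_cases hb : b - a = 0
    · have h1 : (decide (b - c - (a - c) ≠ 0)) = false := by simp; omega
      have h2 : (decide (b - a ≠ 0)) = false := by simp; omega
      rw [h1, h2]; simpa using ih
    · have h1 : (decide (b - c - (a - c) ≠ 0)) = true := by simp; omega
      have h2 : (decide (b - a ≠ 0)) = true := by simp; omega
      rw [h1, h2]
      simp only [if_true, List.map_cons]
      rw [ih]
      congr 1
      omega

theorem cutA_shift (s : List Int) (c : Int) : cutA (s.map (fun v => v - c)) = cutA s := by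
  cases s with
  | nil => rfl
  | cons a t =>
    rw [List.map_cons, cutA_cons, cutA_cons]
    simp only [List.length_cons, List.length_map]
    congr 1
    have := filter_map_shift (a :: t) a c
    simp only [List.map_cons] at this
    rw [this]

theorem filter_ne_head (a : Int) (t : List Int) :
    (a :: t).filter (fun v => decide (v - a ≠ 0)) = t.filter (fun v => decide (v ≠ a)) := by
  simp only [List.filter_cons, sub_self, ne_eq, not_true_eq_false, decide_false]
  apply List.filter_congr
  intro x _; simp [sub_ne_zero]

theorem hp_skip : ∀ (t : List Int) (a : Int), t.Pairwise (· ≤ ·) → (∀ x ∈ t, a ≤ x) →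
    hp (some a) t = hp none (t.filter (fun v => decide (v ≠ a))) := by
  intro t
  induction t with
  | nil => intro a _ _; rfl
  | cons b t' ih =>
    intro a hpw hbd
    have hpw' := (List.pairwise_cons.mp hpw).2
    have hble := (List.pairwise_cons.mp hpw).1
    by_cases hba : b = a
    · subst hba
      rw [hp_cons_eq]
      rw [show (b :: t').filter (fun v => decide (v ≠ b)) = t'.filter (fun v => decide (v ≠ b))
        from by simp]
      exact ih b hpw' hble
    · have hfilt : t'.filter (fun v => decide (v ≠ a)) = t' := by
        apply List.filter_eq_self.mpr
        intro x hx
        have hax : a ≤ b := hbd b (List.mem_cons_self ..)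
        have : b ≤ x := hble x hx
        simp; omega
      rw [show (b :: t').filter (fun v => decide (v ≠ a)) = b :: t'.filter (fun v => decide (v ≠ a))
        from by simp [hba]]
      rw [hfilt, hp_cons_ne _ b t' (by simp [hba]), hp_cons_ne _ b t' (by simp)]

theorem cutA_eq_hp : ∀ (n : Nat) (s : List Int), s.length ≤ n → s.Pairwise (· ≤ ·) →
    cutA s = hp none s := by
  intro n
  induction n with
  | zero =>
    intro s hs _
    have : s = [] := List.length_eq_zero_iff.mp (Nat.le_zero.mp hs)
    subst this; simp [cutA, hp]
  | succ n ih =>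
    intro s hs hpw
    cases s with
    | nil => simp [cutA, hp]
    | cons a t =>
      have hpw' := (List.pairwise_cons.mp hpw).2
      have hble := (List.pairwise_cons.mp hpw).1
      rw [cutA_cons, hp_cons_ne none a t (by simp)]
      congr 1
      rw [cutA_shift, filter_ne_head]
      rw [ih (t.filter (fun v => decide (v ≠ a)))
        (le_trans (List.length_filter_le _ _) (by simpa using hs))
        (hpw'.filter _)]
      exact (hp_skip t a hpw' hble).symm

-- ===== VERDICT (by name: the statement is the Claim_ definition above) =====
theorem cut_the_ropes_spec : Claim_equal_cut_the_ropes := by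
  intro values _
  unfold Spec_cut_the_ropes cut_the_ropes cut_the_ropes_alt
  set s := PySem.List.sorted values (fun x => x) false with hsdef
  have hpw : s.Pairwise (· ≤ ·) := by
    have := PySem.List.sorted_pairwise (xs := values) (key := fun x => x)
    simpa using this
  rw [cutA_eq_hp s.length s le_rfl hpw]
  exact (goB_eq (s.length : Int) s none 0 [] (by simp)).symm
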